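-- pv_equiv track=rewrite | github.com/shalommmitz/naive_obfusucator | obfusucator.py | _case_profile
-- ===== SOURCE A (Python) =====
-- def _case_profile(s: str) -> str:
--     letters = [ch for ch in s if ch.isalpha()]
--     if not letters:
--         return 'mixed'
--     if all(ch.isupper() for ch in letters):
--         return 'upper'
--     if all(ch.islower() for ch in letters):
--         return 'lower'
--     # title if first alpha upper and all other alphas lower
--     first_alpha_idx = next((i for i,ch in enumerate(s) if ch.isalpha()), None)
--     if first_alpha_idx is not None:
--         first_upper = s[first_alpha_idx].isupper()
--         rest_letters = [ch for i,ch in enumerate(s) if ch.isalpha() and i != first_alpha_idx]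
--         if first_upper and all(ch.islower() for ch in rest_letters):
--             return 'title'
--     return 'mixed'
-- ===== SOURCE B (Python) =====
-- def _case_profile(s: str) -> str:
--     # one stateful pass instead of multiple comprehensions/all() passes
--     letter_count = 0
--     all_upper = True
--     all_lower = True
--     first_upper = False
--     rest_lower = True
--     for ch in s:
--         if ch.isalpha():
--             letter_count += 1
--             u = ch.isupper()
--             l = ch.islower()
--             all_upper = all_upper and u
--             all_lower = all_lower and l
--             if letter_count == 1:
--                 first_upper = u
--             else:
--                 rest_lower = rest_lower and l
--     if letter_count == 0:
--         return 'mixed'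
--     if all_upper:
--         return 'upper'
--     if all_lower:
--         return 'lower'
--     if first_upper and rest_lower:
--         return 'title'
--     return 'mixed'
-- ===== Notes on version B (the rewrite author's own statement) =====
-- stated objective: simpler
-- what changed: Replaces A's list comprehensions, multiple all() passes and an enumerate-based first-alpha/rest-letters recomputation with a single for-loop maintaining letter count, all-upper/all-lower flags, the first alpha's case and a rest-lowercase flag.
import Mathlib
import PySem

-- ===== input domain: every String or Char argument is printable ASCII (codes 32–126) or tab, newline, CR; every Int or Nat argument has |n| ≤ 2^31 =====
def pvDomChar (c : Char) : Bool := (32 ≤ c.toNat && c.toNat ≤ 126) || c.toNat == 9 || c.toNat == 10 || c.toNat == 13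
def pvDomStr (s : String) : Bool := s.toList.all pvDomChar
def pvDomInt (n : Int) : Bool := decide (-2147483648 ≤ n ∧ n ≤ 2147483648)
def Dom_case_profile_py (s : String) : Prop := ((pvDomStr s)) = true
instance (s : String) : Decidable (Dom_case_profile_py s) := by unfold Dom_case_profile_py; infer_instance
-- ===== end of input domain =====

-- B replaces A's comprehensions and repeated all() passes by one stateful loop; objective: simpler.

-- ===== PORT A =====
def case_profile_py (s : String) : String :=
  let letters := s.toList.filter (fun ch => PySem.Chars.isalpha ch)
  if letters.isEmpty then "mixed"
  else if letters.all (fun ch => PySem.Chars.isupper ch) then "upper"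
  else if letters.all (fun ch => PySem.Chars.islower ch) then "lower"
  else
    match (PySem.List.enumerate s.toList 0).find? (fun p => PySem.Chars.isalpha p.2) with
    | some (i, _) =>
        -- i is an index produced by enumerate(s), so s[i] exists; the ' ' default is unreachable
        let firstUpper := PySem.Chars.isupper ((PySem.List.pyGet? s.toList i).getD ' ')
        let restLetters := ((PySem.List.enumerate s.toList 0).filter
            (fun p => PySem.Chars.isalpha p.2 && p.1 != i)).map (·.2)
        if firstUpper && restLetters.all (fun ch => PySem.Chars.islower ch) then "title"
        else "mixed"
    | none => "mixed"

-- ===== PORT B =====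
-- loop state: (letter_count, all_upper, all_lower, first_upper, rest_lower)
def caseStep (st : Nat × Bool × Bool × Bool × Bool) (ch : Char) : Nat × Bool × Bool × Bool × Bool :=
  if PySem.Chars.isalpha ch then
    let u := PySem.Chars.isupper ch
    let l := PySem.Chars.islower ch
    (st.1 + 1, st.2.1 && u, st.2.2.1 && l,
     if st.1 = 0 then u else st.2.2.2.1,
     if st.1 = 0 then st.2.2.2.2 else st.2.2.2.2 && l)
  else st

def case_profile_py_alt (s : String) : String :=
  let st := s.toList.foldl caseStep (0, true, true, false, true)
  if st.1 = 0 then "mixed"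
  else if st.2.1 then "upper"
  else if st.2.2.1 then "lower"
  else if st.2.2.2.1 && st.2.2.2.2 then "title"
  else "mixed"

-- ===== PRECONDITION & SPEC =====
def Spec_case_profile_py (s : String) (out : String) : Prop := out = case_profile_py_alt s
instance (s : String) (out : String) : Decidable (Spec_case_profile_py s out) := by unfold Spec_case_profile_py; infer_instance

-- ===== CLAIM =====
def Claim_equal_case_profile_py : Prop := ∀ (s : String), Dom_case_profile_py s → Spec_case_profile_py s (case_profile_py s)

-- ===== LEMMAS AND PROOFS =====

-- B's loop, mid-run (a letter already seen): the remaining letters just AND in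
theorem caseStep_mid (cs : List Char) (n : Nat) (au al fu rl : Bool) (hn : n ≠ 0) :
    cs.foldl caseStep (n, au, al, fu, rl) =
      (n + (cs.filter (fun ch => PySem.Chars.isalpha ch)).length,
       au && (cs.filter (fun ch => PySem.Chars.isalpha ch)).all (fun ch => PySem.Chars.isupper ch),
       al && (cs.filter (fun ch => PySem.Chars.isalpha ch)).all (fun ch => PySem.Chars.islower ch),
       fu,
       rl && (cs.filter (fun ch => PySem.Chars.isalpha ch)).all (fun ch => PySem.Chars.islower ch)) := by
  induction cs generalizing n au al fu rl with
  | nil => simp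
  | cons c cs ih =>
    rw [List.foldl_cons]
    cases h : PySem.Chars.isalpha c with
    | false =>
        rw [show caseStep (n, au, al, fu, rl) c = (n, au, al, fu, rl) by simp [caseStep, h]]
        simp [h, ih _ _ _ _ _ hn]
    | true =>
        rw [show caseStep (n, au, al, fu, rl) c =
            (n + 1, au && PySem.Chars.isupper c, al && PySem.Chars.islower c, fu,
             rl && PySem.Chars.islower c) by simp [caseStep, h, hn]]
        rw [ih _ _ _ _ _ (Nat.succ_ne_zero n)]
        simp [h, Bool.and_assoc]
        omega

-- B's loop from the start, characterised by the filtered letter list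
theorem caseStep_start (cs : List Char) :
    cs.foldl caseStep (0, true, true, false, true) =
      match cs.filter (fun ch => PySem.Chars.isalpha ch) with
      | [] => (0, true, true, false, true)
      | c :: t => (1 + t.length,
          PySem.Chars.isupper c && t.all (fun ch => PySem.Chars.isupper ch),
          PySem.Chars.islower c && t.all (fun ch => PySem.Chars.islower ch),
          PySem.Chars.isupper c,
          t.all (fun ch => PySem.Chars.islower ch)) := by
  induction cs with
  | nil => simp
  | cons c cs ih =>
    rw [List.foldl_cons]
    cases h : PySem.Chars.isalpha c with
    | false =>
        rw [show caseStep (0, true, true, false, true) c = (0, true, true, false, true) by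
          simp [caseStep, h]]
        simpa [List.filter_cons, h] using ih
    | true =>
        rw [show caseStep (0, true, true, false, true) c =
            (1, PySem.Chars.isupper c, PySem.Chars.islower c, PySem.Chars.isupper c, true) by
          simp [caseStep, h]]
        rw [caseStep_mid _ _ _ _ _ _ (Nat.succ_ne_zero 0)]
        simp [h]

-- A's find? over enumerate, characterised by findIdx and the filtered list
theorem find?_enumerate_alpha (cs : List Char) (t : Int) :
    (PySem.List.enumerate cs t).find? (fun p => PySem.Chars.isalpha p.2) =
      match cs.filter (fun ch => PySem.Chars.isalpha ch) with
      | [] => none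
      | c :: _ => some (t + (cs.findIdx (fun ch => PySem.Chars.isalpha ch) : Int), c) := by
  induction cs generalizing t with
  | nil => simp [PySem.List.enumerate_nil]
  | cons c cs ih =>
    cases h : PySem.Chars.isalpha c with
    | true =>
        simp [PySem.List.enumerate_cons, h,
          List.findIdx_cons]
    | false =>
        rw [PySem.List.enumerate_cons, List.find?_cons]
        simp only [h]
        rw [ih (t + 1)]
        simp only [List.filter_cons, h, Bool.false_eq_true, if_false, List.findIdx_cons,
          cond_false]
        cases hf : cs.filter (fun ch => PySem.Chars.isalpha ch) with
        | nil => simp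
        | cons c' t' => simp; ring

-- the element at the found index is the head of the filtered list
theorem getElem?_findIdx_alpha (cs : List Char) (c : Char) (t : List Char)
    (h : cs.filter (fun ch => PySem.Chars.isalpha ch) = c :: t) :
    cs[cs.findIdx (fun ch => PySem.Chars.isalpha ch)]? = some c := by
  induction cs generalizing c t with
  | nil => simp at h
  | cons x cs ih =>
    cases hx : PySem.Chars.isalpha x with
    | true =>
        rw [List.filter_cons] at h
        simp only [hx, if_true, List.cons.injEq] at h
        simp only [List.findIdx_cons, hx, cond_true]
        simp [h.1]
    | false =>
        rw [List.filter_cons] at h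
        simp only [hx, Bool.false_eq_true, if_false] at h
        simp only [List.findIdx_cons, hx, cond_false]
        simpa using ih _ _ h

-- the restricted enumerate filter with an index below the start is just the alpha filter
theorem enum_filter_ne_lt (cs : List Char) (t i : Int) (hi : i < t) :
    ((PySem.List.enumerate cs t).filter
        (fun p => PySem.Chars.isalpha p.2 && p.1 != i)).map (·.2) =
      cs.filter (fun ch => PySem.Chars.isalpha ch) := by
  induction cs generalizing t with
  | nil => simp [PySem.List.enumerate_nil]
  | cons c cs ih =>
    have hbne : ((t : Int) != i) = true := by simp; omega
    rw [PySem.List.enumerate_cons]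
    cases h : PySem.Chars.isalpha c with
    | true =>
        simp only [List.filter_cons, h, hbne, Bool.and_self, if_true, List.map_cons]
        rw [ih (t + 1) (by omega)]
    | false =>
        simp only [List.filter_cons, h, Bool.false_and, Bool.false_eq_true, if_false]
        rw [ih (t + 1) (by omega)]

-- excluding the first alpha's index from the enumerate filter yields the tail of the letters
theorem enum_filter_ne_findIdx (cs : List Char) (t : Int) :
    ((PySem.List.enumerate cs t).filter
        (fun p => PySem.Chars.isalpha p.2 &&
          p.1 != (t + (cs.findIdx (fun ch => PySem.Chars.isalpha ch) : Int)))).map (·.2) =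
      (cs.filter (fun ch => PySem.Chars.isalpha ch)).tail := by
  induction cs generalizing t with
  | nil => simp [PySem.List.enumerate_nil]
  | cons c cs ih =>
    rw [PySem.List.enumerate_cons]
    cases h : PySem.Chars.isalpha c with
    | true =>
        simp only [List.findIdx_cons, h, cond_true, Nat.cast_zero, add_zero, List.filter_cons,
          bne_self_eq_false, Bool.and_false, Bool.false_eq_true, if_false, if_true,
          List.tail_cons]
        exact enum_filter_ne_lt cs (t + 1) t (by omega)
    | false =>
        simp only [List.findIdx_cons, h, cond_false, List.filter_cons, Bool.false_and,
          Bool.false_eq_true, if_false]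
        have := ih (t + 1)
        rw [show (t + 1 + (cs.findIdx (fun ch => PySem.Chars.isalpha ch) : Int)) =
            t + ((cs.findIdx (fun ch => PySem.Chars.isalpha ch) + 1 : Nat) : Int) by
          push_cast; ring] at this
        exact this

-- ===== VERDICT =====
theorem case_profile_py_spec : Claim_equal_case_profile_py := by
  intro s _
  unfold Spec_case_profile_py case_profile_py case_profile_py_alt
  rw [caseStep_start]
  cases hf : s.toList.filter (fun ch => PySem.Chars.isalpha ch) with
  | nil => simp
  | cons c t =>
    rw [find?_enumerate_alpha]
    have hget : PySem.List.pyGet? s.toList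
        ((0 : Int) + (s.toList.findIdx (fun ch => PySem.Chars.isalpha ch) : Int)) = some c := by
      rw [zero_add, PySem.List.pyGet?_natCast]
      exact getElem?_findIdx_alpha _ _ _ hf
    have hrest := enum_filter_ne_findIdx s.toList 0
    simp only [hf, hget, hrest, List.tail_cons, List.all_cons, Option.getD_some,
      List.isEmpty_cons, Bool.false_eq_true, if_false]
    split_ifs <;> simp_all
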